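-- pv_equiv track=rewrite | github.com/LEO0331/Thalassemia_SEQ_analysis | Dataset and py/Find mutation_T023_T0145.py | small_l_prime_array
-- ===== SOURCE A (Python) =====
-- def small_l_prime_array(n):
--     """ Compile lp' array (Gusfield theorem 2.2.4) using N array. """
--     small_lp = [0] * len(n)
--     for i in range(len(n)):
--         if n[i] == i+1:  # prefix matching a suffix
--             small_lp[len(n)-i-1] = i+1
--     for i in range(len(n)-2, -1, -1):  # "smear" them out to the left
--         if small_lp[i] == 0:
--             small_lp[i] = small_lp[i+1]
--     return small_lp
-- ===== SOURCE B (Python) =====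
-- def small_l_prime_array(n):
--     """Compile lp' array (Gusfield theorem 2.2.4) from the N array in one
--     forward pass carrying the running prefix-suffix length, then reverse."""
--     vals = []
--     last = 0
--     for i, v in enumerate(n):
--         if v == i + 1:
--             last = i + 1
--         vals.append(last)
--     return vals[::-1]
-- ===== Notes on version B (the rewrite author's own statement) =====
-- stated objective: alternative
-- what changed: Replaces A's two opposite-direction passes over a mutated array (mark prefix-suffix positions, then smear zeros leftward) by a single forward pass that threads the running match length through an accumulator and reverses the collected values.
import Mathlib
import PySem

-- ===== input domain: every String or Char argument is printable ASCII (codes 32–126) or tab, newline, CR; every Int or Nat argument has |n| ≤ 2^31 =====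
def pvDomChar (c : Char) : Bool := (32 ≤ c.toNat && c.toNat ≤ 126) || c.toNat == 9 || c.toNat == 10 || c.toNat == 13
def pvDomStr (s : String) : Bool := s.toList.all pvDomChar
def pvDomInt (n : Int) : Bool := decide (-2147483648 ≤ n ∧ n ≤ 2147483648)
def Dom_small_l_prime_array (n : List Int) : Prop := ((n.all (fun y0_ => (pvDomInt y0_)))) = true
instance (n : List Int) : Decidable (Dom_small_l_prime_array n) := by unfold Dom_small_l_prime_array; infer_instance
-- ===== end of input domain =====

-- B replaces A's two opposite-direction passes over a mutated array by one forward
-- pass carrying the running match length, reversed at the end (same cost, no mutation).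

-- ===== PORT A =====
-- first loop: mark small_lp[len(n)-i-1] = i+1 where n[i] == i+1 (index i always in range)
def markStep (n : List Int) (acc : List Int) (i : Nat) : List Int :=
  if n.getD i 0 == (i : Int) + 1 then acc.set (n.length - i - 1) ((i : Int) + 1) else acc

-- second loop: for i in range(len(n)-2, -1, -1): smear zeros from the right
def smearStep (acc : List Int) (i : Nat) : List Int :=
  if acc.getD i 0 == 0 then acc.set i (acc.getD (i + 1) 0) else acc

def small_l_prime_array (n : List Int) : List Int :=
  let small_lp := List.replicate n.length (0 : Int)
  let small_lp := (List.range n.length).foldl (markStep n) small_lp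
  (List.range (n.length - 1)).reverse.foldl smearStep small_lp

-- ===== PORT B =====
-- the enumerate-loop of Source B: collects the running value `last` for each position
def bLvals : List Int → Int → Int → List Int
  | [], _, _ => []
  | v :: rest, i, last =>
    let last' := if v == i + 1 then i + 1 else last
    last' :: bLvals rest (i + 1) last'

def small_l_prime_array_alt (n : List Int) : List Int :=
  (bLvals n 0 0).reverse

-- ===== PRECONDITION & SPEC =====
def Spec_small_l_prime_array (n : List Int) (out : List Int) : Prop := out = small_l_prime_array_alt n
instance (n : List Int) (out : List Int) : Decidable (Spec_small_l_prime_array n out) := by unfold Spec_small_l_prime_array; infer_instance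

-- ===== CLAIM (what is proved, stated in full; the proofs are below) =====
def Claim_equal_small_l_prime_array : Prop := ∀ (n : List Int), Dom_small_l_prime_array n → Spec_small_l_prime_array n (small_l_prime_array n)

-- ===== LEMMAS AND PROOFS =====

-- the value of B's accumulator `last` after consuming the first m elements
def lastAfter : List Int → Int → Int → Nat → Int
  | _, _, last, 0 => last
  | [], _, last, _ + 1 => last
  | v :: r, i, last, m + 1 => lastAfter r (i + 1) (if v == i + 1 then i + 1 else last) m

-- value A's first loop leaves at position j
def markF (n : List Int) (j : Nat) : Int :=
  if n.getD (n.length - 1 - j) 0 == ((n.length - 1 - j : Nat) : Int) + 1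
  then ((n.length - 1 - j : Nat) : Int) + 1 else 0

-- value A's result holds at position j
def finalF (n : List Int) (j : Nat) : Int := lastAfter n 0 0 (n.length - j)

theorem pv_getD_set (l : List Int) (i j : Nat) (x : Int) :
    (l.set i x).getD j 0 = if i = j ∧ i < l.length then x else l.getD j 0 := by
  by_cases h2 : i < l.length
  · by_cases h1 : i = j
    · subst h1
      simp [List.getD_eq_getElem?_getD, h2]
    · simp [List.getD_eq_getElem?_getD, h1, h2]
  · rw [List.set_eq_of_length_le (by omega)]
    rw [if_neg (by intro h; exact h2 h.2)]

theorem bLvals_length (l : List Int) (i last : Int) : (bLvals l i last).length = l.length := by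
  induction l generalizing i last with
  | nil => rfl
  | cons v r ih => simp [bLvals, ih]

theorem bLvals_getD (l : List Int) (i last : Int) (k : Nat) :
    k < l.length → (bLvals l i last).getD k 0 = lastAfter l i last (k + 1) := by
  induction l generalizing i last k with
  | nil => simp
  | cons v r ih =>
    intro hk
    cases k with
    | zero => simp [bLvals, lastAfter]
    | succ k =>
      simp only [bLvals, List.getD_cons_succ, lastAfter]
      exact ih _ _ k (by simpa using hk)

theorem lastAfter_step (l : List Int) (i last : Int) (m : Nat) :
    m < l.length →
    lastAfter l i last (m + 1) =
      if l.getD m 0 == i + (m : Int) + 1 then i + (m : Int) + 1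
      else lastAfter l i last m := by
  induction l generalizing i last m with
  | nil => simp
  | cons v r ih =>
    intro hm
    cases m with
    | zero => simp [lastAfter]
    | succ m =>
      have h1 : lastAfter (v :: r) i last (m + 2)
          = lastAfter r (i + 1) (if v == i + 1 then i + 1 else last) (m + 1) := rfl
      have h2 : lastAfter (v :: r) i last (m + 1)
          = lastAfter r (i + 1) (if v == i + 1 then i + 1 else last) m := rfl
      rw [h1, h2, ih _ _ m (by simpa using hm)]
      have : (i + 1) + (m : Int) + 1 = i + ((m : Nat) + 1 : Nat) + 1 := by push_cast; ring
      rw [this]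
      rfl

theorem markFold_length (n : List Int) (m : Nat) (a : List Int) :
    ((List.range m).foldl (markStep n) a).length = a.length := by
  induction m generalizing a with
  | zero => rfl
  | succ m ih =>
    rw [List.range_succ, List.foldl_append, List.foldl_cons, List.foldl_nil]
    simp [markStep]
    split <;> simp [ih]
  
theorem markFold_getD (n : List Int) (m : Nat) (a : List Int) (ha : a.length = n.length)
    (j : Nat) (hj : j < n.length) (hm : m ≤ n.length) :
    ((List.range m).foldl (markStep n) a).getD j 0 =
      if n.length - 1 - j < m ∧
         n.getD (n.length - 1 - j) 0 == ((n.length - 1 - j : Nat) : Int) + 1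
      then ((n.length - 1 - j : Nat) : Int) + 1 else a.getD j 0 := by
  induction m with
  | zero => simp
  | succ m ih =>
    rw [List.range_succ, List.foldl_append, List.foldl_cons, List.foldl_nil]
    have ihm := ih (Nat.le_of_succ_le hm)
    have hlen : (List.foldl (markStep n) a (List.range m)).length = n.length := by
      rw [markFold_length]; exact ha
    generalize hB : List.foldl (markStep n) a (List.range m) = b at ihm hlen
    show (markStep n b m).getD j 0 = _
    simp only [markStep]
    by_cases hc : n.getD m 0 == (m : Int) + 1
    · rw [if_pos hc, pv_getD_set]
      by_cases hpos : n.length - m - 1 = j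
      · have hij : n.length - 1 - j = m := by omega
        rw [if_pos ⟨hpos, by omega⟩, if_pos ⟨by omega, by rw [hij]; exact hc⟩, hij]
      · rw [if_neg (by intro h; exact hpos h.1), ihm]
        have hne : n.length - 1 - j ≠ m := by omega
        by_cases h2 : n.length - 1 - j < m
        · have hiff : (n.length - 1 - j < m ∧
              (n.getD (n.length - 1 - j) 0 == ((n.length - 1 - j : Nat) : Int) + 1) = true) ↔
              (n.length - 1 - j < m + 1 ∧
              (n.getD (n.length - 1 - j) 0 == ((n.length - 1 - j : Nat) : Int) + 1) = true) := by
            constructor <;> rintro ⟨u, v⟩ <;> exact ⟨by omega, v⟩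
          simp only [hiff]
        · rw [if_neg (by intro h; exact h2 (by omega)),
            if_neg (by intro h; exact h2 (by omega))]
    · rw [if_neg hc, ihm]
      have hiff : (n.length - 1 - j < m ∧
          (n.getD (n.length - 1 - j) 0 == ((n.length - 1 - j : Nat) : Int) + 1) = true) ↔
          (n.length - 1 - j < m + 1 ∧
          (n.getD (n.length - 1 - j) 0 == ((n.length - 1 - j : Nat) : Int) + 1) = true) := by
        constructor
        · rintro ⟨u, v⟩; exact ⟨by omega, v⟩
        · rintro ⟨u, v⟩
          refine ⟨?_, v⟩
          rcases Nat.lt_succ_iff_lt_or_eq.mp u with h | h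
          · exact h
          · exact absurd (h ▸ v) hc
      simp only [hiff]

theorem finalF_step (n : List Int) (j : Nat) (hj : j < n.length) :
    finalF n j = if markF n j == 0 then finalF n (j + 1) else markF n j := by
  unfold finalF markF
  have hm : n.length - 1 - j < n.length := by omega
  have hsub : n.length - j = (n.length - 1 - j) + 1 := by omega
  have hsub2 : n.length - (j + 1) = n.length - 1 - j := by omega
  have hz : (0 : Int) + ((n.length - 1 - j : Nat) : Int) + 1 = ((n.length - 1 - j : Nat) : Int) + 1 := by ring
  rw [hsub, lastAfter_step n 0 0 _ hm, hsub2, hz]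
  by_cases hP : (n.getD (n.length - 1 - j) 0 == ((n.length - 1 - j : Nat) : Int) + 1) = true
  · simp only [if_pos hP]
    rw [if_neg (by simp only [beq_iff_eq]; omega)]
    
  · simp only [if_neg hP]
    norm_num

theorem finalF_len (n : List Int) : finalF n n.length = 0 := by
  unfold finalF
  rw [Nat.sub_self]
  cases n <;> rfl

theorem smearFold (n : List Int) (m : Nat) (hm : m < n.length) :
    ∀ (a : List Int), a.length = n.length →
    (∀ j, j < m → a.getD j 0 = markF n j) →
    (∀ j, m ≤ j → j < n.length → a.getD j 0 = finalF n j) →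
    (List.range m).reverse.foldl smearStep a = (List.range n.length).map (finalF n) := by
  induction m with
  | zero =>
    intro a ha _ hhigh
    simp only [List.range_zero, List.reverse_nil, List.foldl_nil]
    apply List.ext_getElem
    · simp [ha]
    · intro j h1 h2
      have := hhigh j (Nat.zero_le j) (by omega)
      simp only [List.getElem_map, List.getElem_range]
      rw [← List.getD_eq_getElem a 0 h1, this]
  | succ m ih =>
    intro a ha hlow hhigh
    have hstep : (List.range (m + 1)).reverse = m :: (List.range m).reverse := by
      rw [List.range_succ]; simp
    rw [hstep, List.foldl_cons]
    have hmlt : m < n.length := by omega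
    have ham : a.getD m 0 = markF n m := hlow m (Nat.lt_succ_self m)
    have hb : (smearStep a m).length = n.length := by
      unfold smearStep; split <;> simp [ha]
    apply ih hmlt (smearStep a m) hb
    · intro j hj
      unfold smearStep
      split
      · rw [pv_getD_set, if_neg (by intro h; omega)]
        exact hlow j (by omega)
      · exact hlow j (by omega)
    · intro j hj1 hj2
      by_cases hjm : j = m
      · subst hjm
        unfold smearStep
        rw [ham]
        by_cases hz : markF n j == 0
        · rw [if_pos hz]
          rw [pv_getD_set, if_pos ⟨rfl, by omega⟩]
          have hnext : a.getD (j + 1) 0 = finalF n (j + 1) := by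
            by_cases hlast : j + 1 < n.length
            · exact hhigh (j + 1) (by omega) hlast
            · have hJ : j + 1 = n.length := by omega
              rw [hJ, finalF_len, List.getD_eq_default _ _ (by omega : a.length ≤ n.length)]
          rw [hnext, finalF_step n j hj2, if_pos hz]
        · rw [if_neg hz]
          rw [ham, finalF_step n j hj2, if_neg hz]
      · have hjgt : m + 1 ≤ j := by omega
        unfold smearStep
        split
        · rw [pv_getD_set, if_neg (by intro h; omega)]
          exact hhigh j hjgt hj2
        · exact hhigh j hjgt hj2

theorem altEq (n : List Int) : small_l_prime_array_alt n = (List.range n.length).map (finalF n) := by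
  unfold small_l_prime_array_alt
  apply List.ext_getElem
  · simp [bLvals_length]
  · intro j h1 h2
    have hlen : (bLvals n 0 0).length = n.length := bLvals_length n 0 0
    have hj : j < n.length := by simpa [hlen] using h2
    rw [List.getElem_reverse]
    simp only [List.getElem_map, List.getElem_range]
    have hk : (bLvals n 0 0).length - 1 - j < n.length := by omega
    rw [← List.getD_eq_getElem _ 0, bLvals_getD n 0 0 _ (by omega)]
    unfold finalF
    congr 1
    omega

-- ===== VERDICT (by name: the statement is the Claim_ definition above) =====
theorem small_l_prime_array_spec : Claim_equal_small_l_prime_array := by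
  intro n _
  unfold Spec_small_l_prime_array
  rw [altEq]
  unfold small_l_prime_array
  by_cases hlen : n.length = 0
  · rw [hlen]
    have : n = [] := List.eq_nil_of_length_eq_zero hlen
    subst this
    rfl
  · have h1 : 0 < n.length := Nat.pos_of_ne_zero hlen
    have hmark : ∀ j, j < n.length →
        ((List.range n.length).foldl (markStep n) (List.replicate n.length 0)).getD j 0 = markF n j := by
      intro j hj
      rw [markFold_getD n n.length _ (by simp) j hj (le_refl _)]
      unfold markF
      have hlt : n.length - 1 - j < n.length := by omega
      have hrep : (List.replicate n.length (0 : Int)).getD j 0 = 0 := by simp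
      rw [hrep]
      by_cases hc : (n.getD (n.length - 1 - j) 0 == ((n.length - 1 - j : Nat) : Int) + 1) = true
      · rw [if_pos ⟨hlt, hc⟩, if_pos hc]
      · rw [if_neg (by intro h; exact hc h.2), if_neg hc]
    apply smearFold n (n.length - 1) (by omega)
    · rw [markFold_length]; simp
    · intro j hj; exact hmark j (by omega)
    · intro j hj1 hj2
      have hje : j = n.length - 1 := by omega
      rw [hmark j hj2, finalF_step n j hj2]
      by_cases hz : markF n j == 0
      · rw [if_pos hz]
        have : j + 1 = n.length := by omega
        rw [this, finalF_len]
        simpa using hz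
      · rw [if_neg hz]
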